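-- pv_equiv track=rewrite | github.com/TheSeamau5/envoi | packages/code/envoi_code/control_plane.py | even_split_counts
-- ===== SOURCE A (Python) =====
-- def even_split_counts(total_runs: int, environment_count: int):
--     if environment_count <= 0:
--         return []
--     base_count = total_runs // environment_count
--     remainder_count = total_runs % environment_count
--     return [
--         base_count + (1 if index < remainder_count else 0)
--         for index in range(environment_count)
--     ]
-- ===== SOURCE B (Python) =====
-- def even_split_counts(total_runs: int, environment_count: int):
--     # Greedy: each slot takes the ceiling of remaining/slots_left; no global divmod.
--     counts = []
--     remaining = total_runs
--     slots = environment_count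
--     while slots > 0:
--         share = -(-remaining // slots)
--         counts.append(share)
--         remaining -= share
--         slots -= 1
--     return counts
-- ===== Notes on version B (the rewrite author's own statement) =====
-- stated objective: alternative
-- what changed: Replaces A's one-shot divmod plus per-index comparison over range with a greedy loop that repeatedly assigns the ceiling of remaining/slots_left and updates the running (remaining, slots) state.
import Mathlib
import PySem

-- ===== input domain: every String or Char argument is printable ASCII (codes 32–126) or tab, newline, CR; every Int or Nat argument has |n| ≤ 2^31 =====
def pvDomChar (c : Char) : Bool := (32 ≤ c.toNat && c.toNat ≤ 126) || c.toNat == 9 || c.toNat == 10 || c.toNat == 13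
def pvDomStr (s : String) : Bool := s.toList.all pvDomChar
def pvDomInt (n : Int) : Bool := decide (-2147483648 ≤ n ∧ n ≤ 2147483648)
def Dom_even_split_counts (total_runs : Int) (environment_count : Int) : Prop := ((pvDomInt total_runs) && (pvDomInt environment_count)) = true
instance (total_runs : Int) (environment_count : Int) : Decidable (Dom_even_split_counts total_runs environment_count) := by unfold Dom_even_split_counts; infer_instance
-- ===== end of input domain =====

-- B replaces A's one-shot divmod + per-index branch by a greedy loop: each slot takes
-- the ceiling of remaining/slots_left and the running state (remaining, slots) shrinks; objective: alternative.
-- ===== PORT A =====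
def even_split_counts (total_runs : Int) (environment_count : Int) : List Int :=
  if environment_count ≤ 0 then []
  else
    let base_count := PySem.Int.floordiv total_runs environment_count
    let remainder_count := PySem.Int.mod total_runs environment_count
    (PySem.List.pyRange 0 environment_count 1).map
      (fun index => base_count + (if index < remainder_count then 1 else 0))

-- ===== PORT B =====
-- the while loop, with the positive Int 'slots' counted down as a Nat fuel (slots.toNat)
def evenSplitGo : Int → Nat → List Int
  | _, 0 => []
  | remaining, n + 1 =>
    let share := -(PySem.Int.floordiv (-remaining) ((n : Int) + 1))
    share :: evenSplitGo (remaining - share) n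

def even_split_counts_alt (total_runs : Int) (environment_count : Int) : List Int :=
  evenSplitGo total_runs environment_count.toNat

-- ===== PRECONDITION & SPEC =====
def Spec_even_split_counts (total_runs : Int) (environment_count : Int) (out : List Int) : Prop := out = even_split_counts_alt total_runs environment_count
instance (total_runs : Int) (environment_count : Int) (out : List Int) : Decidable (Spec_even_split_counts total_runs environment_count out) := by unfold Spec_even_split_counts; infer_instance

-- ===== CLAIM (what is proved, stated in full; the proofs are below) =====
def Claim_equal_even_split_counts : Prop := ∀ (total_runs : Int) (environment_count : Int), Dom_even_split_counts total_runs environment_count → Spec_even_split_counts total_runs environment_count (even_split_counts total_runs environment_count)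

-- ===== LEMMAS AND PROOFS =====

-- Characterisation of the greedy loop: on n slots it yields r copies of q+1 then n-r copies
-- of q, where q = t // n and r = t % n (floor division, n > 0).
lemma evenSplitGo_eq (n : Nat) : ∀ (t q r : Int), t = q * n + r → 0 ≤ r → r < (n : Int) →
    evenSplitGo t n = List.replicate r.toNat (q + 1) ++ List.replicate (n - r.toNat) q := by
  induction n with
  | zero => intro t q r _ h0 hlt; omega
  | succ n ih =>
    intro t q r ht h0 hlt
    push_cast at ht hlt
    have hshare : -(PySem.Int.floordiv (-t) ((n : Int) + 1))
        = q + (if 0 < r then 1 else 0) := by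
      rw [PySem.Int.neg_floordiv_neg_eq_iff_of_pos (by positivity)]
      split_ifs with hr <;> constructor <;> nlinarith
    show (-(PySem.Int.floordiv (-t) ((n : Int) + 1))) ::
        evenSplitGo (t - -(PySem.Int.floordiv (-t) ((n : Int) + 1))) n = _
    rw [hshare]
    by_cases hr : 0 < r
    · rw [if_pos hr]
      rw [ih (t - (q + 1)) q (r - 1) (by linarith) (by omega) (by omega)]
      have h1 : r.toNat = (r - 1).toNat + 1 := by omega
      rw [h1, List.replicate_succ, List.cons_append, Nat.succ_sub_succ]
    · rw [if_neg hr]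
      have hr0 : r = 0 := le_antisymm (not_lt.mp hr) h0
      subst hr0
      simp only [add_zero]
      rcases Nat.eq_zero_or_pos n with hn | hn
      · subst hn; simp [evenSplitGo]
      · rw [ih (t - q) q 0 (by linarith) le_rfl (by exact_mod_cast hn)]
        simp [List.replicate_succ]

-- A's per-index map over range equals the two homogeneous segments.
lemma range_split (b : Int) (n r : Nat) (hr : r ≤ n) :
    (List.range n).map (fun (k : Nat) => b + (if (k : Int) < (r : Int) then 1 else 0)) =
      List.replicate r (b + 1) ++ List.replicate (n - r) b := by
  apply List.ext_getElem
  · simp; omega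
  · intro k h1 h2
    simp only [List.getElem_map, List.getElem_range]
    by_cases hkr : k < r
    · rw [List.getElem_append_left (by simpa using hkr)]
      have : (k : Int) < (r : Int) := by exact_mod_cast hkr
      simp [this]
    · rw [List.getElem_append_right (by simpa using hkr)]
      have : ¬ ((k : Int) < (r : Int)) := by exact_mod_cast hkr
      simp [this]

-- ===== VERDICT (by name: the statement is the Claim_ definition above) =====
theorem even_split_counts_spec : Claim_equal_even_split_counts := by
  intro t e _
  unfold Spec_even_split_counts even_split_counts even_split_counts_alt
  by_cases he : e ≤ 0
  · have : e.toNat = 0 := by omega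
    simp [he, this, evenSplitGo]
  · have hpos : 0 < e := lt_of_not_ge he
    have hen : ((e.toNat : Nat) : Int) = e := by omega
    simp only [he, if_false]
    set q := PySem.Int.floordiv t e with hq
    set r := PySem.Int.mod t e with hrr
    have hsum := PySem.Int.floordiv_mul_add_mod t e
    have h0 : 0 ≤ r := PySem.Int.mod_nonneg t hpos
    have hlt : r < e := PySem.Int.mod_lt t hpos
    rw [PySem.List.pyRange_one, List.map_map]
    have heq : ((fun index => q + (if index < r then 1 else 0)) ∘ fun k : Nat => (0 : Int) + k)
        = fun (k : Nat) => q + (if (k : Int) < ((r.toNat : Nat) : Int) then 1 else 0) := by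
      funext k; simp [Int.toNat_of_nonneg h0]
    have hrn : r.toNat ≤ (e - 0).toNat := by omega
    rw [heq, range_split q (e - 0).toNat r.toNat hrn,
        evenSplitGo_eq e.toNat t q r (by rw [hen]; linarith) h0 (by rw [hen]; exact hlt)]
    congr 2
    omega
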